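-- pv_equiv track=rewrite | github.com/oscarlr/IGenotyper | IGenotyper/detect/snps.py | phased_hap_bases
-- ===== SOURCE A (Python) =====
-- def phased_hap_bases(reads):
--     hap1_base = None
--     hap2_base = None
--     for read_base,read_qual,read_hap in reads:
--         if read_hap == "1":
--             hap1_base = read_base
--         if read_hap == "2":
--             hap2_base = read_base
--     return (hap1_base,hap2_base)
-- ===== SOURCE B (Python) =====
-- def phased_hap_bases(reads):
--     h1 = h2 = None
--     for base, _qual, hap in reversed(list(reads)):
--         if h1 is None and hap == "1":
--             h1 = base
--         if h2 is None and hap == "2":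
--             h2 = base
--         if h1 is not None and h2 is not None:
--             break
--     return (h1, h2)
-- ===== Notes on version B (the rewrite author's own statement) =====
-- stated objective: alternative
-- what changed: Scans the reads in reverse taking the first base seen per haplotype (first-match-from-the-end with early exit) instead of a forward last-wins overwrite loop.
import Mathlib
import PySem

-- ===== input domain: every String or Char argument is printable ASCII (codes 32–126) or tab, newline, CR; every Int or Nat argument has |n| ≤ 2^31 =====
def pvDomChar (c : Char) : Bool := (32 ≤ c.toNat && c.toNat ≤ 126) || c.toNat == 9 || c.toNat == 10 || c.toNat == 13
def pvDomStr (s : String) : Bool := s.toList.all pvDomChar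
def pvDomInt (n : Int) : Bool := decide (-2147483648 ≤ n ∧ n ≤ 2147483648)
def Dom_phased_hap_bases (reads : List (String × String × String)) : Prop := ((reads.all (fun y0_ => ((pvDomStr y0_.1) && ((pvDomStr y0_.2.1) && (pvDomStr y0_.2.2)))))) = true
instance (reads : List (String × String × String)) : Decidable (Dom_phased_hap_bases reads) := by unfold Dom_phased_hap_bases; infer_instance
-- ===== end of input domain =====

-- B scans the reads in reverse with early exit (first match from the end per haplotype)
-- instead of A's forward last-wins overwrite loop; same return value, alternative algorithm.

-- ===== PORT A =====
-- forward loop: the two ifs overwrite hap1/hap2, last match wins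
def phased_hap_bases (reads : List (String × String × String)) : Option String × Option String :=
  reads.foldl
    (fun s r =>
      let s1 := if r.2.2 == "1" then (some r.1, s.2) else s
      if r.2.2 == "2" then (s1.1, some r.1) else s1)
    (none, none)

-- ===== PORT B =====
-- reverse loop with 'keep only if unset' guards and early break once both are set
def pvAltLoop : List (String × String × String) → Option String → Option String → Option String × Option String
  | [], h1, h2 => (h1, h2)
  | (b, _, h) :: rest, h1, h2 =>
      let h1' := if h1.isNone && (h == "1") then some b else h1
      let h2' := if h2.isNone && (h == "2") then some b else h2
      if h1'.isSome && h2'.isSome then (h1', h2') else pvAltLoop rest h1' h2'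

def phased_hap_bases_alt (reads : List (String × String × String)) : Option String × Option String :=
  pvAltLoop reads.reverse none none

-- ===== PRECONDITION & SPEC =====
def Spec_phased_hap_bases (reads : List (String × String × String)) (out : Option String × Option String) : Prop := out = phased_hap_bases_alt reads
instance (reads : List (String × String × String)) (out : Option String × Option String) : Decidable (Spec_phased_hap_bases reads out) := by unfold Spec_phased_hap_bases; infer_instance

-- ===== CLAIM (what is proved, stated in full; the proofs are below) =====
def Claim_equal_phased_hap_bases : Prop := ∀ (reads : List (String × String × String)), Dom_phased_hap_bases reads → Spec_phased_hap_bases reads (phased_hap_bases reads)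

-- ===== LEMMAS AND PROOFS =====

-- first base (from the front of l) whose haplotype equals t
def pvPickFirst : List (String × String × String) → String → Option String
  | [], _ => none
  | (b, _, h) :: rest, t => if h == t then some b else pvPickFirst rest t

theorem pvPickFirst_append (xs ys : List (String × String × String)) (t : String) :
    pvPickFirst (xs ++ ys) t = Option.or (pvPickFirst xs t) (pvPickFirst ys t) := by
  induction xs with
  | nil => simp [pvPickFirst]
  | cons x rest ih =>
      obtain ⟨b, q, h⟩ := x
      by_cases hb : (h == t) = true <;> simp [pvPickFirst, hb, ih, Option.or]

-- A's fold with arbitrary initial state: last match wins, falling back to the initial state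
theorem pvFoldA_eq (reads : List (String × String × String)) (s : Option String × Option String) :
    reads.foldl
      (fun s r =>
        let s1 := if r.2.2 == "1" then (some r.1, s.2) else s
        if r.2.2 == "2" then (s1.1, some r.1) else s1)
      s
    = (Option.or (pvPickFirst reads.reverse "1") s.1,
       Option.or (pvPickFirst reads.reverse "2") s.2) := by
  induction reads generalizing s with
  | nil => simp [pvPickFirst]
  | cons r rest ih =>
      obtain ⟨b, q, h⟩ := r
      rw [List.foldl_cons, ih]
      simp only [List.reverse_cons, pvPickFirst_append]
      by_cases h1 : (h == "1") = true <;>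
        by_cases h2 : (h == "2") = true <;>
          cases hp1 : pvPickFirst rest.reverse "1" <;>
            cases hp2 : pvPickFirst rest.reverse "2" <;>
              simp_all [pvPickFirst, Option.or]

-- B's loop with arbitrary accumulated state: first match from the front, unless already set;
-- the early break is sound because a fully-set state can no longer change
theorem pvAltLoop_eq (l : List (String × String × String)) (h1 h2 : Option String) :
    pvAltLoop l h1 h2 = (Option.or h1 (pvPickFirst l "1"), Option.or h2 (pvPickFirst l "2")) := by
  induction l generalizing h1 h2 with
  | nil => cases h1 <;> cases h2 <;> simp [pvAltLoop, pvPickFirst, Option.or]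
  | cons r rest ih =>
      obtain ⟨b, q, h⟩ := r
      by_cases hb1 : (h == "1") = true <;>
        by_cases hb2 : (h == "2") = true <;>
          cases h1 <;> cases h2 <;>
            simp_all [pvAltLoop, pvPickFirst, Option.or, ih, Option.or_of_isSome]

-- ===== VERDICT (by name: the statement is the Claim_ definition above) =====
theorem phased_hap_bases_spec : Claim_equal_phased_hap_bases := by
  intro reads _
  show phased_hap_bases reads = phased_hap_bases_alt reads
  rw [phased_hap_bases, phased_hap_bases_alt, pvFoldA_eq, pvAltLoop_eq]
  cases pvPickFirst reads.reverse "1" <;> cases pvPickFirst reads.reverse "2" <;> rfl
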